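-- pv_equiv track=rewrite | github.com/guilourenco-dev/Projects | Projetos FP/FP2425P1.py | obtem_diagonais
-- ===== SOURCE A (Python) =====
-- def obtem_dimensao(tabuleiro):
--     """
--     Descrição:
--     Recebe um tabuleiro(tuplo de tuplos de inteiros entre -1, 0 e 1, e de tamanho correto)
--     Retorna as dimensões do tabuleiro (m, n)
--     """
--     m = len(tabuleiro)              # Número de linhas do tabuleiro
--     n = len(tabuleiro[0])           # Número de colunas do tabuleiro
--     return (m, n)
--
-- def obtem_dimensoes_pos(tabuleiro, posicao):            # Função auxiliar para obter a linha ou a coluna apartir da posicao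
--     """
--     Descrição:
--     Recebe um tabuleiro(tuplo de tuplos de inteiros entre -1, 0 e 1, e de tamanho correto) e uma posição desse tabuleiro(int)
--     Retorna as dimensões do tabuleiro(m - linha,n - coluna)
--     """
--
--     _,n = obtem_dimensao(tabuleiro)
--     linha = (posicao - 1) // n
--     coluna = (posicao - 1) % n
--     return (linha,coluna)
--
-- def obtem_diagonais(tabuleiro, posicao):
--     """
--     Descrição:
--     Recebe um tabuleiro(tuplo de tuplos de inteiros entre -1, 0 e 1, e de tamanho correto) e uma posição desse tabuleiro(int)
--     Retornam as posições de uma diagonal e antidiagonal específicas no tabuleiro, em relação a uma posição dada.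
--     """
--
--     diagonal = (posicao,)
--     antidiagonal = (posicao,)
--     m,n = obtem_dimensao(tabuleiro)
--     pos_copia_01, pos_copia_02, pos_copia_03, pos_copia_04 = posicao, posicao, posicao, posicao
--
--     if not 0 < posicao <= (m * n):
--         return ((),())
--
--     while (obtem_dimensoes_pos(tabuleiro, pos_copia_01)[0] and obtem_dimensoes_pos(tabuleiro, pos_copia_01)[1]) > 0:   # Obter os valores da diagonal anteriores à posição
--         pos_copia_01 -= n + 1                                                                                         # Para todos os casos, os valores da diagonal diferenciam uns dos outros pela dimensão das colunas -n mais um (n + 1)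
--         diagonal = (pos_copia_01,) + diagonal
--     while obtem_dimensoes_pos(tabuleiro, pos_copia_02)[0] < m - 1 and obtem_dimensoes_pos(tabuleiro, pos_copia_02)[1] < n - 1:    # Obter os valores da diagonal posteriores à posição
--         pos_copia_02 += n + 1
--         diagonal += (pos_copia_02,)
--
--     while obtem_dimensoes_pos(tabuleiro, pos_copia_03)[0] < m - 1 and obtem_dimensoes_pos(tabuleiro, pos_copia_03)[1] > 0:     # Obter os valores da antidiagonal anteriores à posição
--         pos_copia_03 += n - 1                                                                                                 # Para todos os casos, os valores da antidiagonal diferenciam uns dos outros pela dimensão das colunas -n menos um (n - 1)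
--         antidiagonal = (pos_copia_03,) + antidiagonal
--     while obtem_dimensoes_pos(tabuleiro, pos_copia_04)[0] > 0 and obtem_dimensoes_pos(tabuleiro, pos_copia_04)[1] < n - 1:     # Obter os valores da antidiagonal posteriores à posição
--         pos_copia_04 -= n - 1
--         antidiagonal += (pos_copia_04,)
--
--     return (diagonal,antidiagonal)
-- ===== SOURCE B (Python) =====
-- def obtem_diagonais(tabuleiro, posicao):
--     m = len(tabuleiro)
--     n = len(tabuleiro[0])
--     if not 0 < posicao <= m * n:
--         return ((), ())
--     row, col = divmod(posicao - 1, n)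
--     back = min(row, col)
--     fwd = min(m - 1 - row, n - 1 - col)
--     start = posicao - back * (n + 1)
--     diagonal = tuple(start + i * (n + 1) for i in range(back + fwd + 1))
--     down = min(m - 1 - row, col)
--     up = min(row, n - 1 - col)
--     top = posicao + down * (n - 1)
--     antidiagonal = tuple(top - i * (n - 1) for i in range(down + up + 1))
--     return (diagonal, antidiagonal)
-- ===== Notes on version B (the rewrite author's own statement) =====
-- stated objective: simpler
-- what changed: A walks outward from the cell with four while loops that re-divide the position at every step; B computes row/col once and emits each diagonal as a closed-form arithmetic progression over a single range.
-- outside the precondition, e.g. on obtem_diagonais((), 3): A raises IndexError, B raises IndexError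
import Mathlib
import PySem

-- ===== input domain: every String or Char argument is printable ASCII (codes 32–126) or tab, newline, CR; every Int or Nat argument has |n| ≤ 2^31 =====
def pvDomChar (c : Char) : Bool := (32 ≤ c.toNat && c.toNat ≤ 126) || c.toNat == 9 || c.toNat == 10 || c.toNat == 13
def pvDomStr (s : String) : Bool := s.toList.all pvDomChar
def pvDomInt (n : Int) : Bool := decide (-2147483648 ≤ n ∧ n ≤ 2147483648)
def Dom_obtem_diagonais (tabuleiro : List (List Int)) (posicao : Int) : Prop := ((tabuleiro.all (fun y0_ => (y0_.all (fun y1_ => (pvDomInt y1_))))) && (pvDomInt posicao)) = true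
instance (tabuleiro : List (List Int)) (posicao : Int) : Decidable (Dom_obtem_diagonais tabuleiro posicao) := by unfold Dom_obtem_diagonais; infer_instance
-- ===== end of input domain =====

-- B replaces A's four position-stepping while loops by a closed-form arithmetic-progression construction (simpler); equivalence proved for non-empty boards (A raises IndexError on []).


-- ===== PORT A =====
-- len(tabuleiro), len(tabuleiro[0]); tabuleiro[0] raises IndexError on [] (excluded by Pre_), the (0,0) arm is a totality guard only
def obtem_dimensao (tabuleiro : List (List Int)) : Int × Int :=
  match PySem.List.pyGet? tabuleiro 0 with
  | some r => ((tabuleiro.length : Int), (r.length : Int))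
  | none => (0, 0)

def obtem_dimensoes_pos (tabuleiro : List (List Int)) (posicao : Int) : Int × Int :=
  let n := (obtem_dimensao tabuleiro).2
  (PySem.Int.floordiv (posicao - 1) n, PySem.Int.mod (posicao - 1) n)

-- while (linha and coluna) > 0: Python's truthy `and` is ported literally as (if linha = 0 then linha else coluna)
def loopDiagPrev (tabuleiro : List (List Int)) (n : Int) : Nat → Int → List Int → List Int
  | 0, _, diag => diag
  | fuel+1, pos, diag =>
    let lc := obtem_dimensoes_pos tabuleiro pos
    if (if lc.1 = 0 then lc.1 else lc.2) > 0 then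
      loopDiagPrev tabuleiro n fuel (pos - (n+1)) ((pos - (n+1)) :: diag)
    else diag

def loopDiagNext (tabuleiro : List (List Int)) (m n : Int) : Nat → Int → List Int → List Int
  | 0, _, diag => diag
  | fuel+1, pos, diag =>
    let lc := obtem_dimensoes_pos tabuleiro pos
    if lc.1 < m - 1 ∧ lc.2 < n - 1 then
      loopDiagNext tabuleiro m n fuel (pos + (n+1)) (diag ++ [pos + (n+1)])
    else diag

def loopAntiPrev (tabuleiro : List (List Int)) (m n : Int) : Nat → Int → List Int → List Int
  | 0, _, anti => anti
  | fuel+1, pos, anti =>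
    let lc := obtem_dimensoes_pos tabuleiro pos
    if lc.1 < m - 1 ∧ lc.2 > 0 then
      loopAntiPrev tabuleiro m n fuel (pos + (n-1)) ((pos + (n-1)) :: anti)
    else anti

def loopAntiNext (tabuleiro : List (List Int)) (n : Int) : Nat → Int → List Int → List Int
  | 0, _, anti => anti
  | fuel+1, pos, anti =>
    let lc := obtem_dimensoes_pos tabuleiro pos
    if lc.1 > 0 ∧ lc.2 < n - 1 then
      loopAntiNext tabuleiro n fuel (pos - (n-1)) (anti ++ [pos - (n-1)])
    else anti

-- the fuel (m+n).toNat only makes the while loops total; each loop runs < m+n times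
def obtem_diagonais (tabuleiro : List (List Int)) (posicao : Int) : List Int × List Int :=
  let diagonal : List Int := [posicao]
  let antidiagonal : List Int := [posicao]
  let mn := obtem_dimensao tabuleiro
  let m := mn.1
  let n := mn.2
  if ¬ (0 < posicao ∧ posicao ≤ m * n) then ([], [])
  else
    let fuel := (m + n).toNat
    let diagonal := loopDiagNext tabuleiro m n fuel posicao (loopDiagPrev tabuleiro n fuel posicao diagonal)
    let antidiagonal := loopAntiNext tabuleiro n fuel posicao (loopAntiPrev tabuleiro m n fuel posicao antidiagonal)
    (diagonal, antidiagonal)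

-- ===== PORT B =====
-- tabuleiro[0] raises on [] exactly as in A; the none arm is a totality guard outside Pre_
def obtem_diagonais_alt (tabuleiro : List (List Int)) (posicao : Int) : List Int × List Int :=
  match PySem.List.pyGet? tabuleiro 0 with
  | none => ([], [])
  | some r =>
    let m : Int := tabuleiro.length
    let n : Int := r.length
    if ¬ (0 < posicao ∧ posicao ≤ m * n) then ([], [])
    else
      let row := PySem.Int.floordiv (posicao - 1) n
      let col := PySem.Int.mod (posicao - 1) n
      let back := min row col
      let fwd := min (m - 1 - row) (n - 1 - col)
      let start := posicao - back * (n + 1)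
      let diagonal := (PySem.List.pyRange 0 (back + fwd + 1) 1).map (fun i => start + i * (n + 1))
      let down := min (m - 1 - row) col
      let up := min row (n - 1 - col)
      let top := posicao + down * (n - 1)
      let antidiagonal := (PySem.List.pyRange 0 (down + up + 1) 1).map (fun i => top - i * (n - 1))
      (diagonal, antidiagonal)

-- ===== PRECONDITION & SPEC =====
-- Pre_ excludes only the empty board, on which Python A (and B) raise IndexError at tabuleiro[0]
def Pre_obtem_diagonais (tabuleiro : List (List Int)) (_posicao : Int) : Prop := tabuleiro ≠ []
instance (tabuleiro : List (List Int)) (posicao : Int) : Decidable (Pre_obtem_diagonais tabuleiro posicao) := by unfold Pre_obtem_diagonais; infer_instance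
def pvWitness_obtem_diagonais : List (List Int) × Int := ([[0, 0], [0, 0]], 2)

def Spec_obtem_diagonais (tabuleiro : List (List Int)) (posicao : Int) (out : List Int × List Int) : Prop := out = obtem_diagonais_alt tabuleiro posicao
instance (tabuleiro : List (List Int)) (posicao : Int) (out : List Int × List Int) : Decidable (Spec_obtem_diagonais tabuleiro posicao out) := by unfold Spec_obtem_diagonais; infer_instance

-- ===== CLAIM (what is proved, stated in full; the proofs are below) =====
def Claim_equal_obtem_diagonais : Prop := ∀ (tabuleiro : List (List Int)) (posicao : Int), Dom_obtem_diagonais tabuleiro posicao → Pre_obtem_diagonais tabuleiro posicao → Spec_obtem_diagonais tabuleiro posicao (obtem_diagonais tabuleiro posicao)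

-- ===== LEMMAS AND PROOFS =====

-- floor-division/mod of a decomposed numerator by a positive divisor
lemma fd_eq (n p row col : Int) (hn : 0 < n) (he : p = row * n + col)
    (h0 : 0 ≤ col) (h1 : col < n) :
    PySem.Int.floordiv p n = row ∧ PySem.Int.mod p n = col := by
  rw [PySem.Int.floordiv_eq_ediv_of_pos hn, PySem.Int.mod_eq_emod_of_pos hn]
  subst he
  refine ⟨?_, ?_⟩
  · rw [add_comm, Int.add_mul_ediv_right _ _ (by omega : n ≠ 0), Int.ediv_eq_zero_of_lt h0 h1]
    ring
  · rw [add_comm, Int.add_mul_emod_self_right]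
    exact Int.emod_eq_of_lt h0 h1

lemma loopDiagPrev_eq (tab : List (List Int)) (n : Int)
    (hn2 : (obtem_dimensao tab).2 = n) (hn : 0 < n) :
    ∀ (b : Nat), ∀ (fuel : Nat) (pos row col : Int) (diag : List Int),
      b ≤ fuel → pos - 1 = row * n + col → 0 ≤ col → col < n → 0 ≤ row →
      ((b : Int) = min row col) →
      loopDiagPrev tab n fuel pos diag
        = (List.range b).map (fun i : Nat => pos - ((b : Int) - (i : Int)) * (n + 1)) ++ diag := by
  intro b
  induction b with
  | zero =>
    intro fuel pos row col diag hf he h0 h1 hr hmin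
    cases fuel with
    | zero => simp [loopDiagPrev]
    | succ fl =>
      have hfd := fd_eq n (pos - 1) row col hn he h0 h1
      simp only [loopDiagPrev, obtem_dimensoes_pos, hn2, hfd.1, hfd.2]
      rw [if_neg]
      · simp
      · by_cases hr0 : row = 0
        · simp [hr0]
        · simp [hr0]
          omega
  | succ b ih =>
    intro fuel pos row col diag hf he h0 h1 hr hmin
    cases fuel with
    | zero => omega
    | succ fl =>
      have hfd := fd_eq n (pos - 1) row col hn he h0 h1
      simp only [loopDiagPrev, obtem_dimensoes_pos, hn2, hfd.1, hfd.2]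
      rw [if_pos]
      · rw [ih fl (pos - (n+1)) (row - 1) (col - 1) _ (by omega) (by linarith) (by omega) (by omega) (by omega) (by omega)]
        rw [List.range_succ, List.map_append, List.append_assoc]
        refine congrArg₂ (· ++ ·) ?_ ?_
        · refine List.map_congr_left (fun i _ => ?_)
          push_cast
          ring
        · simp only [List.map_cons, List.map_nil, List.singleton_append]
          refine congrArg₂ (· :: ·) ?_ rfl
          push_cast
          ring
      · have hr1 : row ≠ 0 := by omega
        simp only [if_neg hr1]
        omega

lemma loopDiagNext_eq (tab : List (List Int)) (m n : Int)
    (hn2 : (obtem_dimensao tab).2 = n) (hn : 0 < n) :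
    ∀ (f : Nat), ∀ (fuel : Nat) (pos row col : Int) (diag : List Int),
      f ≤ fuel → pos - 1 = row * n + col → 0 ≤ col → col < n → 0 ≤ row → row ≤ m - 1 →
      ((f : Int) = min (m - 1 - row) (n - 1 - col)) →
      loopDiagNext tab m n fuel pos diag
        = diag ++ (List.range f).map (fun i : Nat => pos + ((i : Int) + 1) * (n + 1)) := by
  intro f
  induction f with
  | zero =>
    intro fuel pos row col diag hf he h0 h1 hr hrm hmin
    cases fuel with
    | zero => simp [loopDiagNext]
    | succ fl =>
      have hfd := fd_eq n (pos - 1) row col hn he h0 h1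
      simp only [loopDiagNext, obtem_dimensoes_pos, hn2, hfd.1, hfd.2]
      rw [if_neg (by omega)]
      simp
  | succ f ih =>
    intro fuel pos row col diag hf he h0 h1 hr hrm hmin
    cases fuel with
    | zero => omega
    | succ fl =>
      have hfd := fd_eq n (pos - 1) row col hn he h0 h1
      simp only [loopDiagNext, obtem_dimensoes_pos, hn2, hfd.1, hfd.2]
      rw [if_pos (by omega)]
      rw [ih fl (pos + (n+1)) (row + 1) (col + 1) _ (by omega) (by linarith) (by omega) (by omega) (by omega) (by omega) (by omega)]
      rw [List.range_succ_eq_map, List.map_cons, List.map_map, List.append_assoc, List.singleton_append]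
      refine congrArg₂ (· ++ ·) rfl ?_
      refine congrArg₂ (· :: ·) (by push_cast; ring) ?_
      refine List.map_congr_left (fun i _ => ?_)
      simp only [Function.comp]
      push_cast
      ring

lemma loopAntiPrev_eq (tab : List (List Int)) (m n : Int)
    (hn2 : (obtem_dimensao tab).2 = n) (hn : 0 < n) :
    ∀ (d : Nat), ∀ (fuel : Nat) (pos row col : Int) (anti : List Int),
      d ≤ fuel → pos - 1 = row * n + col → 0 ≤ col → col < n → 0 ≤ row → row ≤ m - 1 →
      ((d : Int) = min (m - 1 - row) col) →
      loopAntiPrev tab m n fuel pos anti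
        = (List.range d).map (fun i : Nat => pos + ((d : Int) - (i : Int)) * (n - 1)) ++ anti := by
  intro d
  induction d with
  | zero =>
    intro fuel pos row col anti hf he h0 h1 hr hrm hmin
    cases fuel with
    | zero => simp [loopAntiPrev]
    | succ fl =>
      have hfd := fd_eq n (pos - 1) row col hn he h0 h1
      simp only [loopAntiPrev, obtem_dimensoes_pos, hn2, hfd.1, hfd.2]
      rw [if_neg (by omega)]
      simp
  | succ d ih =>
    intro fuel pos row col anti hf he h0 h1 hr hrm hmin
    cases fuel with
    | zero => omega
    | succ fl =>
      have hfd := fd_eq n (pos - 1) row col hn he h0 h1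
      simp only [loopAntiPrev, obtem_dimensoes_pos, hn2, hfd.1, hfd.2]
      rw [if_pos (by omega)]
      rw [ih fl (pos + (n-1)) (row + 1) (col - 1) _ (by omega) (by linarith) (by omega) (by omega) (by omega) (by omega) (by omega)]
      rw [List.range_succ, List.map_append, List.append_assoc]
      refine congrArg₂ (· ++ ·) ?_ ?_
      · refine List.map_congr_left (fun i _ => ?_)
        push_cast
        ring
      · simp only [List.map_cons, List.map_nil, List.singleton_append]
        refine congrArg₂ (· :: ·) ?_ rfl
        push_cast
        ring

lemma loopAntiNext_eq (tab : List (List Int)) (n : Int)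
    (hn2 : (obtem_dimensao tab).2 = n) (hn : 0 < n) :
    ∀ (u : Nat), ∀ (fuel : Nat) (pos row col : Int) (anti : List Int),
      u ≤ fuel → pos - 1 = row * n + col → 0 ≤ col → col < n → 0 ≤ row →
      ((u : Int) = min row (n - 1 - col)) →
      loopAntiNext tab n fuel pos anti
        = anti ++ (List.range u).map (fun i : Nat => pos - ((i : Int) + 1) * (n - 1)) := by
  intro u
  induction u with
  | zero =>
    intro fuel pos row col anti hf he h0 h1 hr hmin
    cases fuel with
    | zero => simp [loopAntiNext]
    | succ fl =>
      have hfd := fd_eq n (pos - 1) row col hn he h0 h1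
      simp only [loopAntiNext, obtem_dimensoes_pos, hn2, hfd.1, hfd.2]
      rw [if_neg (by omega)]
      simp
  | succ u ih =>
    intro fuel pos row col anti hf he h0 h1 hr hmin
    cases fuel with
    | zero => omega
    | succ fl =>
      have hfd := fd_eq n (pos - 1) row col hn he h0 h1
      simp only [loopAntiNext, obtem_dimensoes_pos, hn2, hfd.1, hfd.2]
      rw [if_pos (by omega)]
      rw [ih fl (pos - (n-1)) (row - 1) (col + 1) _ (by omega) (by linarith) (by omega) (by omega) (by omega) (by omega)]
      rw [List.range_succ_eq_map, List.map_cons, List.map_map, List.append_assoc, List.singleton_append]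
      refine congrArg₂ (· ++ ·) rfl ?_
      refine congrArg₂ (· :: ·) (by push_cast; ring) ?_
      refine List.map_congr_left (fun i _ => ?_)
      simp only [Function.comp]
      push_cast
      ring

-- an arithmetic progression of b+f+1 terms split at its (b+1)-st term x
lemma progSplit (s : Int) : ∀ (b : Nat), ∀ (f : Nat) (x : Int),
    (List.range (b + f + 1)).map (fun k : Nat => (x - (b : Int) * s) + (k : Int) * s)
      = (List.range b).map (fun i : Nat => x - ((b : Int) - (i : Int)) * s)
        ++ x :: (List.range f).map (fun i : Nat => x + ((i : Int) + 1) * s) := by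
  intro b
  induction b with
  | zero =>
    intro f x
    simp only [Nat.zero_add, List.range_succ_eq_map, List.map_cons, List.map_map,
      List.range_zero, List.map_nil, List.nil_append]
    refine congrArg₂ (· :: ·) (by push_cast; ring) ?_
    refine List.map_congr_left (fun i _ => ?_)
    simp only [Function.comp]
    push_cast
    ring
  | succ b ih =>
    intro f x
    rw [show b + 1 + f + 1 = (b + f + 1) + 1 from by omega, List.range_succ_eq_map,
      List.map_cons, List.map_map]
    have hmap : (List.range (b + f + 1)).map
        ((fun k : Nat => (x - (((b+1 : Nat)) : Int) * s) + (k : Int) * s) ∘ Nat.succ)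
        = (List.range (b + f + 1)).map (fun k : Nat => (x - (b : Int) * s) + (k : Int) * s) := by
      refine List.map_congr_left (fun i _ => ?_)
      simp only [Function.comp]
      push_cast
      ring
    rw [hmap, ih f x, List.range_succ_eq_map, List.map_cons, List.map_map, List.cons_append]
    refine congrArg₂ (· :: ·) (by push_cast; ring) ?_
    refine congrArg₂ (· ++ ·) ?_ rfl
    refine List.map_congr_left (fun i _ => ?_)
    simp only [Function.comp]
    push_cast
    ring

-- ===== VERDICT (by name: the statement is the Claim_ definition above) =====
theorem obtem_diagonais_spec : Claim_equal_obtem_diagonais := by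
  intro tab pos _ hpre
  unfold Spec_obtem_diagonais
  cases tab with
  | nil => exact absurd rfl hpre
  | cons r rest =>
    simp only [obtem_diagonais, obtem_diagonais_alt, obtem_dimensao, PySem.List.pyGet?_zero_cons]
    by_cases hg : 0 < pos ∧ pos ≤ ((r :: rest).length : Int) * (r.length : Int)
    case neg => rw [if_pos hg, if_pos hg]
    case pos =>
      rw [if_neg (not_not_intro hg), if_neg (not_not_intro hg)]
      set m : Int := ((r :: rest).length : Int) with hm_def
      set n : Int := (r.length : Int) with hn_def
      have hn2 : (obtem_dimensao (r :: rest)).2 = n := by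
        simp [obtem_dimensao, hn_def]
      have hn0 : 0 ≤ n := by rw [hn_def]; exact Int.natCast_nonneg _
      have hm0 : 0 ≤ m := by rw [hm_def]; exact Int.natCast_nonneg _
      have hn : 0 < n := by
        rcases hg with ⟨h1, h2⟩
        by_contra h
        have : n = 0 := by omega
        rw [this, mul_zero] at h2
        omega
      set row := (pos - 1) / n with hrow
      set col := (pos - 1) % n with hcol
      have hrc : row * n + col = pos - 1 := by
        rw [hrow, hcol, mul_comm]
        exact Int.mul_ediv_add_emod _ _
      have hc0 : 0 ≤ col := Int.emod_nonneg _ (by omega)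
      have hc1 : col < n := Int.emod_lt_of_pos _ hn
      have hr0 : 0 ≤ row := Int.ediv_nonneg (by omega) (by omega)
      have hrm : row ≤ m - 1 := by
        have h2 : row * n < m * n := by linarith [hg.1, hg.2]
        have := lt_of_mul_lt_mul_right h2 (le_of_lt hn)
        omega
      obtain ⟨b, hb⟩ : ∃ b : Nat, (b : Int) = min row col :=
        ⟨(min row col).toNat, Int.toNat_of_nonneg (by omega)⟩
      obtain ⟨f, hf⟩ : ∃ f : Nat, (f : Int) = min (m - 1 - row) (n - 1 - col) :=
        ⟨(min (m - 1 - row) (n - 1 - col)).toNat, Int.toNat_of_nonneg (by omega)⟩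
      obtain ⟨d, hd⟩ : ∃ d : Nat, (d : Int) = min (m - 1 - row) col :=
        ⟨(min (m - 1 - row) col).toNat, Int.toNat_of_nonneg (by omega)⟩
      obtain ⟨u, hu⟩ : ∃ u : Nat, (u : Int) = min row (n - 1 - col) :=
        ⟨(min row (n - 1 - col)).toNat, Int.toNat_of_nonneg (by omega)⟩
      have hfuel : (((m + n).toNat : Nat) : Int) = m + n := Int.toNat_of_nonneg (by omega)
      rw [PySem.Int.floordiv_eq_ediv_of_pos hn, PySem.Int.mod_eq_emod_of_pos hn]
      rw [loopDiagPrev_eq (r :: rest) n hn2 hn b ((m + n).toNat) pos row col [pos]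
            (by omega) hrc.symm hc0 hc1 hr0 hb]
      rw [loopDiagNext_eq (r :: rest) m n hn2 hn f ((m + n).toNat) pos row col _
            (by omega) hrc.symm hc0 hc1 hr0 hrm hf]
      rw [loopAntiPrev_eq (r :: rest) m n hn2 hn d ((m + n).toNat) pos row col [pos]
            (by omega) hrc.symm hc0 hc1 hr0 hrm hd]
      rw [loopAntiNext_eq (r :: rest) n hn2 hn u ((m + n).toNat) pos row col _
            (by omega) hrc.symm hc0 hc1 hr0 hu]
      rw [PySem.List.pyRange_one, PySem.List.pyRange_one, List.map_map, List.map_map]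
      rw [show (min row col + min (m - 1 - row) (n - 1 - col) + 1 - 0).toNat = b + f + 1 from by omega]
      rw [show (min (m - 1 - row) col + min row (n - 1 - col) + 1 - 0).toNat = d + u + 1 from by omega]
      have hmap1 : (List.range (b + f + 1)).map
          ((fun i => pos - min row col * (n + 1) + i * (n + 1)) ∘ fun k : Nat => 0 + (k : Int))
          = (List.range (b + f + 1)).map (fun k : Nat => (pos - (b : Int) * (n + 1)) + (k : Int) * (n + 1)) := by
        refine List.map_congr_left (fun i _ => ?_)
        simp only [Function.comp]
        rw [← hb]
        ring
      have hmap2 : (List.range (d + u + 1)).map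
          ((fun i => pos + min (m - 1 - row) col * (n - 1) - i * (n - 1)) ∘ fun k : Nat => 0 + (k : Int))
          = (List.range (d + u + 1)).map (fun k : Nat => (pos - (d : Int) * (-(n - 1))) + (k : Int) * (-(n - 1))) := by
        refine List.map_congr_left (fun i _ => ?_)
        simp only [Function.comp]
        rw [← hd]
        ring
      rw [hmap1, hmap2, progSplit (n + 1) b f pos, progSplit (-(n - 1)) d u pos]
      simp only [Prod.mk.injEq]
      refine ⟨?_, ?_⟩
      · rw [List.append_assoc, List.singleton_append]
      · rw [List.append_assoc, List.singleton_append]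
        refine congrArg₂ (· ++ ·) ?_ (congrArg₂ (· :: ·) rfl ?_)
        · refine List.map_congr_left (fun i _ => ?_)
          ring
        · refine List.map_congr_left (fun i _ => ?_)
          ring
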